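-- pv_equiv track=rewrite | github.com/jojurajan/code-fight | Chandos_Number/answer.py | nth_chandos_number
-- ===== SOURCE A (Python) =====
-- def nth_chandos_number(n):
--     chando_list = []
--     step = 1
--     while len(chando_list) < n:
--         temp_list = []
--         chando_list.append(pow(5, step))
--         last_item = chando_list[-1]
--         for item in chando_list[:-1]:
--             temp_list.append(item + last_item)
--         if temp_list:
--             chando_list.extend(temp_list)
--         step += 1
--
--     return chando_list[n - 1]
-- ===== SOURCE B (Python) =====
-- def nth_chandos_number(n):
--     # nth Chandos number = sum of 5^(i+1) over the set bits i of n's binary expansion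
--     total = 0
--     p = 5
--     while n > 0:
--         if n % 2 == 1:
--             total += p
--         p *= 5
--         n //= 2
--     return total
-- ===== Notes on version B (the rewrite author's own statement) =====
-- stated objective: faster
-- what changed: Instead of generating the whole list of the first n Chandos numbers by repeatedly appending a new power of 5 and all its sums with earlier entries, B reads n's binary expansion and directly sums 5^(i+1) over the set bits.
import Mathlib
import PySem

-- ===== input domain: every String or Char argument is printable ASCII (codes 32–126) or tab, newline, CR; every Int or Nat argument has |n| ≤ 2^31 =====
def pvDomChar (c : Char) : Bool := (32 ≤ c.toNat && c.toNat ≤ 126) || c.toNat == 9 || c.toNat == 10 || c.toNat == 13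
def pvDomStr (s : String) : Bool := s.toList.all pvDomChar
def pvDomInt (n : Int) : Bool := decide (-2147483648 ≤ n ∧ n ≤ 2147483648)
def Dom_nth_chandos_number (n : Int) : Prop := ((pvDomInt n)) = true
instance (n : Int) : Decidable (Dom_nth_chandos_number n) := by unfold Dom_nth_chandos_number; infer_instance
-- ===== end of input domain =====

-- B replaces A's O(n) list generation by summing 5^(i+1) over the set bits of n (O(log n)); faster (asymptotic).

-- ===== PORT A =====
-- the while-loop of A: recursion on how far the list is from length n
def pvLoopA (n : Int) (chando : List Int) (step : Nat) : List Int :=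
  if h : (chando.length : Int) < n then
    -- chando_list.append(pow(5, step))
    let chando1 := chando ++ [(5 : Int) ^ step]
    -- last_item = chando_list[-1]
    let last := PySem.List.pyGetD chando1 (-1) 0
    -- for item in chando_list[:-1]: temp_list.append(item + last_item)   (xs[:-1] = dropLast, exact)
    let temp := chando1.dropLast.map (fun item => item + last)
    -- if temp_list: chando_list.extend(temp_list)
    let chando2 := if temp ≠ [] then chando1 ++ temp else chando1
    pvLoopA n chando2 (step + 1)
  else chando
termination_by n.toNat - chando.length
decreasing_by
  have h1 : chando.length < n.toNat := by omega
  split <;> simp <;> omega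

def nth_chandos_number (n : Int) : Int :=
  let chando_list := pvLoopA n [] 1
  -- chando_list[n - 1]; raises IndexError outside Pre_, total form used under Pre_
  PySem.List.pyGetD chando_list (n - 1) 0

-- ===== PORT B =====
-- the while-loop of B: peel binary digits of n, accumulating powers of 5
def pvAltGo (n p total : Int) : Int :=
  if h : 0 < n then
    pvAltGo (PySem.Int.floordiv n 2) (p * 5)
      (if PySem.Int.mod n 2 = 1 then total + p else total)
  else total
termination_by n.toNat
decreasing_by
  rw [PySem.Int.floordiv_eq_ediv_of_pos (by omega)]
  omega

def nth_chandos_number_alt (n : Int) : Int := pvAltGo n 5 0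

-- ===== PRECONDITION & SPEC =====
-- A indexes chando_list[n-1]; for n ≤ 0 the list is empty and Python raises IndexError
def Pre_nth_chandos_number (n : Int) : Prop := 1 ≤ n
instance (n : Int) : Decidable (Pre_nth_chandos_number n) := by
  unfold Pre_nth_chandos_number; infer_instance
def pvWitness_nth_chandos_number : Int := 3

def Spec_nth_chandos_number (n : Int) (out : Int) : Prop := out = nth_chandos_number_alt n
instance (n : Int) (out : Int) : Decidable (Spec_nth_chandos_number n out) := by
  unfold Spec_nth_chandos_number; infer_instance

-- ===== CLAIM (what is proved, stated in full; the proofs are below) =====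
def Claim_equal_nth_chandos_number : Prop :=
  ∀ (n : Int), Dom_nth_chandos_number n → Pre_nth_chandos_number n →
    Spec_nth_chandos_number n (nth_chandos_number n)

-- ===== LEMMAS AND PROOFS =====

-- wbits m = Σ over set bits i of m of 5^i
def pvW : Nat → Int
  | 0 => 0
  | m + 1 => (if (m + 1) % 2 = 1 then 1 else 0) + 5 * pvW ((m + 1) / 2)
decreasing_by omega

lemma pvW_rec (m : Nat) : pvW m = (if m % 2 = 1 then 1 else 0) + 5 * pvW (m / 2) := by
  cases m with
  | zero => simp [pvW]
  | succ k => rw [pvW]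

lemma pvW_add (p : Nat) : ∀ k, k < 2 ^ p → pvW (2 ^ p + k) = 5 ^ p + pvW k := by
  induction p with
  | zero =>
    intro k hk
    interval_cases k
    norm_num [pvW]
  | succ p ih =>
    intro k hk
    have h2 : 2 ^ (p + 1) = 2 * 2 ^ p := by ring
    rw [pvW_rec (2 ^ (p + 1) + k)]
    have hdiv : (2 ^ (p + 1) + k) / 2 = 2 ^ p + k / 2 := by omega
    have hmod : (2 ^ (p + 1) + k) % 2 = k % 2 := by omega
    rw [hdiv, hmod, ih (k / 2) (by omega), pvW_rec k]
    ring

-- the list A has built after completing `step = s` iterations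
def pvL (s : Nat) : List Int := (List.range' 1 (2 ^ s - 1)).map (fun k => 5 * pvW k)

lemma pvL_length (s : Nat) : (pvL s).length = 2 ^ s - 1 := by
  simp [pvL]

lemma pvL_rec (p : Nat) :
    pvL (p + 1) = (pvL p ++ [(5 : Int) ^ (p + 1)]) ++ (pvL p).map (· + 5 ^ (p + 1)) := by
  have h1 : (1 : Nat) ≤ 2 ^ p := Nat.one_le_two_pow
  have hsplit : List.range' 1 (2 ^ (p + 1) - 1) =
      List.range' 1 (2 ^ p - 1) ++ List.range' (2 ^ p) (2 ^ p) := by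
    rw [show 2 ^ (p + 1) - 1 = (2 ^ p - 1) + 2 ^ p by rw [pow_succ]; omega,
        ← List.range'_append]
    rw [show 1 + 1 * (2 ^ p - 1) = 2 ^ p by omega]
  have hcons : List.range' (2 ^ p) (2 ^ p) =
      2 ^ p :: List.range' (2 ^ p + 1) (2 ^ p - 1) := by
    rw [show 2 ^ p = (2 ^ p - 1) + 1 by omega]
    rw [List.range'_succ]
    congr 1
  have hhead : 5 * pvW (2 ^ p) = (5 : Int) ^ (p + 1) := by
    have h0 := pvW_add p 0 (by omega)
    simp only [Nat.add_zero, pvW] at h0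
    rw [h0]; ring
  have htail : (List.range' (2 ^ p + 1) (2 ^ p - 1)).map (fun k => 5 * pvW k) =
      ((List.range' 1 (2 ^ p - 1)).map (fun k => 5 * pvW k)).map (· + 5 ^ (p + 1)) := by
    rw [List.range'_eq_map_range, List.range'_eq_map_range]
    simp only [List.map_map]
    apply List.map_congr_left
    intro i hi
    have hi' : i < 2 ^ p - 1 := List.mem_range.mp hi
    simp only [Function.comp_apply]
    rw [show 2 ^ p + 1 + i = 2 ^ p + (1 + i) by omega, pvW_add p (1 + i) (by omega)]
    ring
  simp only [pvL, hsplit, hcons, List.map_append, List.map_cons, htail, hhead]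
  simp [List.append_assoc]

lemma pvLoopA_eq (n : Int) (hn : 1 ≤ n) :
    ∀ (d p : Nat), n.toNat ≤ 2 ^ p - 1 + d →
      ∃ t, pvLoopA n (pvL p) (p + 1) = pvL t ∧ n.toNat ≤ 2 ^ t - 1 := by
  intro d
  induction d with
  | zero =>
    intro p hle
    refine ⟨p, ?_, by omega⟩
    unfold pvLoopA
    have hlen : (pvL p).length = 2 ^ p - 1 := pvL_length p
    rw [dif_neg (by omega)]
  | succ d ih =>
    intro p hle
    have hlen : (pvL p).length = 2 ^ p - 1 := pvL_length p
    by_cases hc : ((pvL p).length : Int) < n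
    · unfold pvLoopA
      rw [dif_pos hc]
      have hlast : PySem.List.pyGetD (pvL p ++ [(5 : Int) ^ (p + 1)]) (-1) 0 = 5 ^ (p + 1) :=
        PySem.List.pyGetD_neg_one_append_singleton _ _ _
      have hdrop : (pvL p ++ [(5 : Int) ^ (p + 1)]).dropLast = pvL p :=
        List.dropLast_concat ..
      have hbody :
          (if (pvL p ++ [(5:Int)^(p+1)]).dropLast.map
                (fun item => item + PySem.List.pyGetD (pvL p ++ [(5:Int)^(p+1)]) (-1) 0) ≠ [] then
             (pvL p ++ [(5:Int)^(p+1)]) ++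
               (pvL p ++ [(5:Int)^(p+1)]).dropLast.map
                 (fun item => item + PySem.List.pyGetD (pvL p ++ [(5:Int)^(p+1)]) (-1) 0)
           else pvL p ++ [(5:Int)^(p+1)]) = pvL (p + 1) := by
        rw [hlast, hdrop, pvL_rec p]
        split
        · rfl
        · next hne =>
          simp only [ne_eq, not_not] at hne
          rw [hne, List.append_nil]
      simp only [hbody]
      have h2 : 2 ^ (p + 1) = 2 * 2 ^ p := by ring
      have h1 : (1 : Nat) ≤ 2 ^ p := Nat.one_le_two_pow
      exact ih (p + 1) (by omega)
    · unfold pvLoopA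
      rw [dif_neg hc]
      exact ⟨p, rfl, by omega⟩

lemma pvAltGo_eq (m : Nat) : ∀ (n p t : Int), n.toNat = m →
    pvAltGo n p t = t + p * pvW m := by
  induction m using Nat.strong_induction_on with
  | _ m ih =>
    intro n p t hm
    unfold pvAltGo
    split
    · next h =>
      have hm0 : 0 < m := by omega
      have hd : PySem.Int.floordiv n 2 = n / 2 := PySem.Int.floordiv_eq_ediv_of_pos (by omega)
      have he : PySem.Int.mod n 2 = n % 2 := PySem.Int.mod_eq_emod_of_pos (by omega)
      rw [ih (m / 2) (by omega) _ _ _ (by rw [hd]; omega)]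
      rw [pvW_rec m, he]
      by_cases hb : m % 2 = 1
      · rw [if_pos (by omega : n % 2 = 1), if_pos hb]; ring
      · rw [if_neg (by omega : ¬ n % 2 = 1), if_neg hb]; ring
    · next h =>
      have : m = 0 := by omega
      subst this
      simp [pvW]

-- ===== VERDICT (by name: the statement is the Claim_ definition above) =====
theorem nth_chandos_number_spec : Claim_equal_nth_chandos_number := by
  intro n _ hpre
  unfold Pre_nth_chandos_number at hpre
  unfold Spec_nth_chandos_number nth_chandos_number nth_chandos_number_alt
  have hstart : pvLoopA n [] 1 = pvLoopA n (pvL 0) 1 := by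
    rw [show pvL 0 = ([] : List Int) from by simp [pvL]]
  obtain ⟨t, hL, hlen⟩ := pvLoopA_eq n hpre n.toNat 0 (by omega)
  simp only [hstart, hL]
  have hidx : n - 1 = ((n.toNat - 1 : Nat) : Int) := by omega
  rw [hidx, PySem.List.pyGetD_natCast]
  have hlt : n.toNat - 1 < (pvL t).length := by rw [pvL_length]; omega
  rw [List.getD_eq_getElem _ _ hlt]
  have hget : (pvL t)[n.toNat - 1] = 5 * pvW (1 + (n.toNat - 1)) := by
    simp [pvL, List.getElem_range']
  rw [hget, show 1 + (n.toNat - 1) = n.toNat by omega]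
  rw [pvAltGo_eq n.toNat n 5 0 rfl]
  ring
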